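-- pv_equiv track=rewrite | github.com/N8Brooks/leetcode | algorithms/python/check_if_a_string_can_break_another_string.py | can_break
-- ===== SOURCE A (Python) =====
-- from itertools import accumulate
-- from operator import sub
-- from string import ascii_lowercase
--
-- def can_break(s_1: str, s_2: str) -> bool:
--     return all(
--         n >= 0
--         for n in accumulate(
--             map(
--                 sub,
--                 map(s_1.count, ascii_lowercase),
--                 map(s_2.count, ascii_lowercase),
--             )
--         )
--     )
-- ===== SOURCE B (Python) =====
-- def can_break(s_1: str, s_2: str) -> bool:
--     x = sorted(c for c in s_1 if 'a' <= c <= 'z')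
--     y = sorted(c for c in s_2 if 'a' <= c <= 'z')
--     return len(x) >= len(y) and all(a <= b for a, b in zip(x, y))
-- ===== Notes on version B (the rewrite author's own statement) =====
-- stated objective: alternative
-- what changed: Replaces A's 26 per-letter str.count scans piped through accumulate/map(sub)/all (prefix-sum dominance) with the sort-based dominance check: sort the a-z characters of each string and compare them positionally (len(x) >= len(y) and x[i] <= y[i] pointwise under zip).
import Mathlib
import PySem

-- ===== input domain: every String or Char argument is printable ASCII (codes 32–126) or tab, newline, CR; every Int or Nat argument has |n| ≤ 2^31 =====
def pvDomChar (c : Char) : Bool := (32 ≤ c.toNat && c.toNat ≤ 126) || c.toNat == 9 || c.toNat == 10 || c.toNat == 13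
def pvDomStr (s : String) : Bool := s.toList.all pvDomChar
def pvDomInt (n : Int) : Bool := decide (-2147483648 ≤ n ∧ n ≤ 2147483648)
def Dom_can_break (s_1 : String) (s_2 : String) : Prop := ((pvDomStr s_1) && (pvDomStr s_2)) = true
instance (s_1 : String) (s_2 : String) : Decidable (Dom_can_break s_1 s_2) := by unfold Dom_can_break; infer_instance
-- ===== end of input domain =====

-- B replaces A's 26 per-letter count scans piped through accumulate/map(sub)/all with the
-- sort-based dominance check: sort the a-z characters of each string and compare positionally.

-- ===== PORT A =====
-- string.ascii_lowercase
def asciiLowercase : List Char := "abcdefghijklmnopqrstuvwxyz".toList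

-- all(n >= 0 for n in accumulate(diffs)): streaming prefix sums checked against 0
def pyAllAccNonneg : Int → List Int → Bool
  | _, [] => true
  | acc, d :: rest =>
      let n := acc + d
      if 0 ≤ n then pyAllAccNonneg n rest else false

def can_break (s_1 : String) (s_2 : String) : Bool :=
  -- map(sub, map(s_1.count, ascii_lowercase), map(s_2.count, ascii_lowercase))
  let diffs := asciiLowercase.map (fun c =>
    (PySem.Str.count s_1 (String.ofList [c]) : Int) - (PySem.Str.count s_2 (String.ofList [c]) : Int))
  pyAllAccNonneg 0 diffs

-- ===== PORT B =====
-- sorted(c for c in s if 'a' <= c <= 'z')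
def lowSorted (s : String) : List Char :=
  PySem.List.sorted (s.toList.filter (fun c => decide ('a' ≤ c) && decide (c ≤ 'z'))) (fun c => c) false

-- len(x) >= len(y) and all(a <= b for a, b in zip(x, y))
def can_break_alt (s_1 : String) (s_2 : String) : Bool :=
  let x := lowSorted s_1
  let y := lowSorted s_2
  decide (y.length ≤ x.length) && (x.zip y).all (fun p => decide (p.1 ≤ p.2))

-- ===== PRECONDITION & SPEC =====
def Spec_can_break (s_1 : String) (s_2 : String) (out : Bool) : Prop := out = can_break_alt s_1 s_2
instance (s_1 : String) (s_2 : String) (out : Bool) : Decidable (Spec_can_break s_1 s_2 out) := by unfold Spec_can_break; infer_instance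

-- ===== CLAIM (what is proved, stated in full; the proofs are below) =====
def Claim_equal_can_break : Prop := ∀ (s_1 : String) (s_2 : String), Dom_can_break s_1 s_2 → Spec_can_break s_1 s_2 (can_break s_1 s_2)

-- ===== LEMMAS AND PROOFS =====

-- Python s.count(c) for a single character c is the plain character count
theorem chars_count_go_single (c : Char) (l : List Char) : ∀ (fuel acc : Nat),
    l.length ≤ fuel → PySem.Chars.count.go [c] fuel l acc = acc + l.count c := by
  induction l with
  | nil => intro fuel acc _; cases fuel <;> simp [PySem.Chars.count.go]
  | cons h t ih =>
      intro fuel acc hf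
      cases fuel with
      | zero => simp at hf
      | succ f =>
          have hft : t.length ≤ f := by simpa using hf
          simp only [PySem.Chars.count.go]
          by_cases hc : c = h
          · subst hc
            rw [if_pos (by simp [List.isPrefixOf])]
            simp [ih f (acc + 1) hft]
            omega
          · rw [if_neg (by simp [List.isPrefixOf, hc])]
            simp [ih f acc hft, Ne.symm hc]

theorem str_count_single (s : String) (c : Char) :
    PySem.Str.count s (String.ofList [c]) = s.toList.count c := by
  show PySem.Chars.count s.toList (String.ofList [c]).toList = _
  have h1 : (String.ofList [c]).toList = [c] := by simp
  rw [h1]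
  simpa [PySem.Chars.count, List.isEmpty] using
    chars_count_go_single c s.toList s.toList.length 0 le_rfl

-- Char order is codepoint order
theorem char_le_iff (a b : Char) : a ≤ b ↔ a.toNat ≤ b.toNat := by
  rw [Char.le_def]; exact UInt32.le_iff_toNat_le

theorem ofNat_toNat26 : ∀ k : Fin 26, (Char.ofNat (97 + (k : Nat))).toNat = 97 + (k : Nat) := by
  decide

theorem letters_getElem? : ∀ k : Fin 26, asciiLowercase[(k : Nat)]? = some (Char.ofNat (97 + (k : Nat))) := by
  decide

-- the prefix-sum loop, characterised by all its partial sums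
theorem acc_iff (l : List Int) : ∀ a : Int,
    (pyAllAccNonneg a l = true ↔ ∀ k, k < l.length → 0 ≤ a + (l.take (k + 1)).sum) := by
  induction l with
  | nil => intro a; simp [pyAllAccNonneg]
  | cons d t ih =>
      intro a
      simp only [pyAllAccNonneg]
      by_cases h : (0 : Int) ≤ a + d
      · rw [if_pos h, ih]
        constructor
        · intro H k hk
          cases k with
          | zero => simpa using h
          | succ j =>
              have := H j (by simpa using hk)
              simp only [List.take_succ_cons, List.sum_cons]
              omega
        · intro H k hk
          have := H (k + 1) (by simpa using hk)
          simp only [List.take_succ_cons, List.sum_cons] at this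
          omega
      · rw [if_neg h]
        constructor
        · intro h'; simp at h'
        · intro H
          exact absurd (by simpa using H 0 (by simp)) h

theorem sum_map_sub (g h : Char → Int) (P : List Char) :
    (P.map (fun c => g c - h c)).sum = (P.map g).sum - (P.map h).sum := by
  induction P with
  | nil => simp
  | cons c t ih => simp [ih]; ring

theorem countP_or_disjoint (p q : Char → Bool) (hd : ∀ d, ¬(p d = true ∧ q d = true)) :
    ∀ s : List Char, s.countP (fun d => p d || q d) = s.countP p + s.countP q := by
  intro s
  induction s with
  | nil => simp
  | cons a t ih =>
      by_cases hp : p a = true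
      · by_cases hq : q a = true
        · exact absurd ⟨hp, hq⟩ (hd a)
        · simp [hp, hq, ih]; omega
      · by_cases hq : q a = true
        · simp [hp, hq, ih]; omega
        · simp [hp, hq, ih]

-- sum of per-letter counts over a duplicate-free letter list = one membership count
theorem sum_counts (P : List Char) (hnd : P.Nodup) (s : List Char) :
    (P.map (fun c => (s.count c : Int))).sum = (s.countP (fun d => decide (d ∈ P)) : Int) := by
  induction P with
  | nil => simp
  | cons c t ih =>
      rcases List.nodup_cons.mp hnd with ⟨hc, ht⟩
      have hsplit : s.countP (fun d => decide (d ∈ c :: t)) =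
          s.countP (fun d => d == c) + s.countP (fun d => decide (d ∈ t)) := by
        have : (fun d : Char => decide (d ∈ c :: t)) =
            (fun d : Char => (d == c) || decide (d ∈ t)) := by
          funext d
          by_cases h : d = c <;> simp [List.mem_cons, h]
        rw [this]
        exact countP_or_disjoint _ _ (fun d ⟨h1, h2⟩ => hc (by
          have : d = c := by simpa using h1
          simpa [this] using h2)) s
      rw [List.map_cons, List.sum_cons, ih ht, hsplit, List.count_eq_countP]
      push_cast
      ring

-- membership in a prefix of ascii_lowercase is a codepoint interval
theorem mem_take_letters : ∀ k, k < 26 → ∀ d : Char,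
    (d ∈ asciiLowercase.take (k + 1) ↔ 97 ≤ d.toNat ∧ d.toNat ≤ 97 + k) := by
  intro k
  induction k with
  | zero =>
      intro _ d
      show d ∈ ['a'] ↔ _
      constructor
      · intro h; simp at h; subst h; decide
      · intro ⟨h1, h2⟩
        have : d = Char.ofNat 97 := by
          rw [← Char.ofNat_toNat d]; congr 1; omega
        rw [this]; decide
  | succ j ih =>
      intro hk d
      have hj : j < 26 := by omega
      have hjf : ((⟨j + 1, hk⟩ : Fin 26) : Nat) = j + 1 := rfl
      have hget := letters_getElem? ⟨j + 1, hk⟩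
      rw [hjf] at hget
      have htake : asciiLowercase.take (j + 2) =
          asciiLowercase.take (j + 1) ++ [Char.ofNat (97 + (j + 1))] := by
        rw [List.take_add_one, hget]; rfl
      rw [htake]
      have hofn := ofNat_toNat26 ⟨j + 1, hk⟩
      rw [hjf] at hofn
      constructor
      · intro h
        rcases List.mem_append.mp h with h | h
        · have := (ih hj d).mp h; omega
        · simp at h; subst h; omega
      · intro ⟨h1, h2⟩
        by_cases hle : d.toNat ≤ 97 + j
        · exact List.mem_append.mpr (Or.inl ((ih hj d).mpr ⟨h1, hle⟩))
        · have hd : d = Char.ofNat (97 + (j + 1)) := by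
            rw [← Char.ofNat_toNat d]; congr 1; omega
          exact List.mem_append.mpr (Or.inr (by simp [hd]))

-- the number of characters of l with codepoint in [97, 97+k]
def cnt (l : List Char) (k : Nat) : Nat :=
  l.countP (fun d => decide (97 ≤ d.toNat ∧ d.toNat ≤ 97 + k))

-- A characterised: all 26 prefix dominance inequalities
theorem can_break_iff (s_1 s_2 : String) :
    can_break s_1 s_2 = true ↔ ∀ k, k < 26 → cnt s_2.toList k ≤ cnt s_1.toList k := by
  unfold can_break
  rw [acc_iff]
  have hlen : (asciiLowercase.map (fun c =>
      (PySem.Str.count s_1 (String.ofList [c]) : Int) - (PySem.Str.count s_2 (String.ofList [c]) : Int))).length = 26 := by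
    simp [asciiLowercase]
  rw [hlen]
  have key : ∀ k, k < 26 →
      ((asciiLowercase.map (fun c =>
        (PySem.Str.count s_1 (String.ofList [c]) : Int) - (PySem.Str.count s_2 (String.ofList [c]) : Int))).take (k + 1)).sum
      = (cnt s_1.toList k : Int) - (cnt s_2.toList k : Int) := by
    intro k hk
    have hnd : (asciiLowercase.take (k + 1)).Nodup :=
      (by decide : asciiLowercase.Nodup).sublist (List.take_sublist _ _)
    rw [← List.map_take, sum_map_sub]
    have hs : ∀ s : String, ((asciiLowercase.take (k + 1)).map
        (fun c => (PySem.Str.count s (String.ofList [c]) : Int))).sum = (cnt s.toList k : Int) := by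
      intro s
      have h1 : ((asciiLowercase.take (k + 1)).map
          (fun c => (PySem.Str.count s (String.ofList [c]) : Int))) =
          ((asciiLowercase.take (k + 1)).map (fun c => (s.toList.count c : Int))) := by
        apply List.map_congr_left; intro c _; rw [str_count_single]
      rw [h1, sum_counts _ hnd]
      congr 1
      unfold cnt
      apply List.countP_congr
      intro d _
      simp only [decide_eq_true_eq]
      exact mem_take_letters k hk d
    rw [hs, hs]
  constructor
  · intro H k hk
    have := H k hk
    rw [key k hk] at this
    omega
  · intro H k hk
    rw [key k hk]
    have := H k hk
    omega

-- sorted-list count: the elements ≤ c form an initial segment whose length is the count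
theorem sorted_countP (z : List Char) (hz : z.Pairwise (fun a b => a ≤ b)) (c : Char) :
    ∀ i, (hi : i < z.length) → (z[i] ≤ c ↔ i < z.countP (fun d => decide (d ≤ c))) := by
  induction z with
  | nil => intro i hi; simp at hi
  | cons h t ih =>
      rcases List.pairwise_cons.mp hz with ⟨hht, ht⟩
      intro i hi
      by_cases hc : h ≤ c
      · rw [List.countP_cons_of_pos (by simpa using hc)]
        cases i with
        | zero => simpa using hc
        | succ j =>
            have hj : j < t.length := by simpa using hi
            have := ih ht j hj
            simpa using this
      · have hzero : t.countP (fun d => decide (d ≤ c)) = 0 := by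
          rw [List.countP_eq_zero]
          intro d hd
          simp only [decide_eq_true_eq]
          intro hdc
          exact hc (le_trans (hht d hd) hdc)
        rw [List.countP_cons_of_neg (by simpa using hc), hzero]
        cases i with
        | zero => simpa using hc
        | succ j =>
            have hj : j < t.length := by simpa using hi
            simp only [List.getElem_cons_succ]
            constructor
            · intro hdc
              exact absurd (le_trans (hht _ (List.getElem_mem hj)) hdc) hc
            · omega

-- every element of lowSorted s is a lowercase codepoint, and its ≤-counts are the cnt's
theorem lowSorted_pairwise (s : String) : (lowSorted s).Pairwise (fun a b => a ≤ b) :=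
  PySem.List.sorted_pairwise _ _

theorem lowSorted_mem (s : String) (d : Char) (hd : d ∈ lowSorted s) :
    97 ≤ d.toNat ∧ d.toNat ≤ 122 := by
  have := (PySem.List.mem_sorted _ _ _ _).mp hd
  have := List.mem_filter.mp this
  rcases this with ⟨-, hf⟩
  simp only [Bool.and_eq_true, decide_eq_true_eq] at hf
  rcases hf with ⟨h1, h2⟩
  rw [char_le_iff] at h1 h2
  exact ⟨h1, h2⟩

theorem lowSorted_countP (s : String) (k : Nat) (hk : k < 26) :
    (lowSorted s).countP (fun d => decide (d ≤ Char.ofNat (97 + k))) = cnt s.toList k := by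
  have hperm : (lowSorted s).Perm (s.toList.filter (fun c => decide ('a' ≤ c) && decide (c ≤ 'z'))) :=
    PySem.List.sorted_perm _ _ _
  rw [hperm.countP_eq, List.countP_filter]
  unfold cnt
  apply List.countP_congr
  intro d _
  have hofn := ofNat_toNat26 ⟨k, hk⟩
  simp only [Bool.and_eq_true, decide_eq_true_eq, char_le_iff, hofn]
  constructor
  · intro ⟨h1, h2, _⟩; exact ⟨h2, h1⟩
  · intro ⟨h1, h2⟩
    refine ⟨h2, h1, ?_⟩
    have : ('z' : Char).toNat = 122 := by decide
    omega

theorem lowSorted_length (s : String) : (lowSorted s).length = cnt s.toList 25 := by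
  have h : (lowSorted s).countP (fun d => decide (d ≤ Char.ofNat (97 + 25))) = (lowSorted s).length := by
    rw [List.countP_eq_length]
    intro d hd
    rcases lowSorted_mem s d hd with ⟨h1, h2⟩
    simp only [decide_eq_true_eq, char_le_iff]
    have : (Char.ofNat 122).toNat = 122 := by decide
    simpa using (by omega : d.toNat ≤ 122).trans_eq this.symm
  rw [← h]
  exact lowSorted_countP s 25 (by omega)

-- B characterised: length guard plus pointwise comparison
theorem can_break_alt_iff (s_1 s_2 : String) :
    can_break_alt s_1 s_2 = true ↔
      ((lowSorted s_2).length ≤ (lowSorted s_1).length ∧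
        ∀ i, (h1 : i < (lowSorted s_1).length) → (h2 : i < (lowSorted s_2).length) →
          (lowSorted s_1)[i] ≤ (lowSorted s_2)[i]) := by
  unfold can_break_alt
  simp only [Bool.and_eq_true, decide_eq_true_eq, List.all_eq_true]
  constructor
  · intro ⟨hl, hall⟩
    refine ⟨hl, fun i h1 h2 => ?_⟩
    have hi : i < ((lowSorted s_1).zip (lowSorted s_2)).length := by
      rw [List.length_zip]; omega
    have := hall _ (List.getElem_mem hi)
    simpa [List.getElem_zip] using this
  · intro ⟨hl, hpt⟩
    refine ⟨hl, fun p hp => ?_⟩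
    rcases List.mem_iff_getElem.mp hp with ⟨i, hi, rfl⟩
    have hiz := hi
    rw [List.length_zip] at hiz
    simp only [List.getElem_zip]
    exact hpt i (by omega) (by omega)

-- dominance ⇔ sorted positional comparison
theorem dom_iff_pointwise (s_1 s_2 : String) :
    (∀ k, k < 26 → cnt s_2.toList k ≤ cnt s_1.toList k) ↔
      ((lowSorted s_2).length ≤ (lowSorted s_1).length ∧
        ∀ i, (h1 : i < (lowSorted s_1).length) → (h2 : i < (lowSorted s_2).length) →
          (lowSorted s_1)[i] ≤ (lowSorted s_2)[i]) := by
  constructor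
  · intro H
    have hlen : (lowSorted s_2).length ≤ (lowSorted s_1).length := by
      rw [lowSorted_length, lowSorted_length]
      exact H 25 (by omega)
    refine ⟨hlen, fun i h1 h2 => ?_⟩
    have hc := lowSorted_mem s_2 ((lowSorted s_2)[i]) (List.getElem_mem h2)
    have hk : (lowSorted s_2)[i].toNat - 97 < 26 := by omega
    have hofc : Char.ofNat (97 + ((lowSorted s_2)[i].toNat - 97)) = (lowSorted s_2)[i] := by
      have harg : 97 + ((lowSorted s_2)[i].toNat - 97) = (lowSorted s_2)[i].toNat := by omega
      rw [harg, Char.ofNat_toNat]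
    -- i < countP (· ≤ y[i]) on lowSorted s_2, since y[i] ≤ y[i]
    have hy : i < (lowSorted s_2).countP (fun d => decide (d ≤ (lowSorted s_2)[i])) :=
      (sorted_countP _ (lowSorted_pairwise s_2) _ i h2).mp le_rfl
    have hdom := H _ hk
    rw [← lowSorted_countP s_1 _ hk, ← lowSorted_countP s_2 _ hk, hofc] at hdom
    exact (sorted_countP _ (lowSorted_pairwise s_1) _ i h1).mpr (lt_of_lt_of_le hy hdom)
  · intro ⟨hlen, hpt⟩ k hk
    rw [← lowSorted_countP s_1 k hk, ← lowSorted_countP s_2 k hk]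
    set c := Char.ofNat (97 + k)
    set m := (lowSorted s_2).countP (fun d => decide (d ≤ c)) with hm
    rcases Nat.eq_zero_or_pos m with h0 | hpos
    · omega
    · have hmle : m ≤ (lowSorted s_2).length := List.countP_le_length ..
      have hi2 : m - 1 < (lowSorted s_2).length := by omega
      have hi1 : m - 1 < (lowSorted s_1).length := by omega
      have hy : (lowSorted s_2)[m - 1] ≤ c :=
        (sorted_countP _ (lowSorted_pairwise s_2) c (m - 1) hi2).mpr (by omega)
      have hx : (lowSorted s_1)[m - 1] ≤ c :=
        le_trans (hpt (m - 1) hi1 hi2) hy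
      have := (sorted_countP _ (lowSorted_pairwise s_1) c (m - 1) hi1).mp hx
      omega

-- ===== VERDICT (by name: the statement is the Claim_ definition above) =====
theorem can_break_spec : Claim_equal_can_break := by
  intro s_1 s_2 _
  unfold Spec_can_break
  rw [Bool.eq_iff_iff, can_break_iff, can_break_alt_iff]
  exact dom_iff_pointwise s_1 s_2
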